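-- pv_equiv track=rewrite | github.com/serre-ai/research | scripts/compass/relation_inferrer.py | _effective_polarity
-- ===== SOURCE A (Python) =====
-- POSITIVE = {
--     "improve", "improves", "improved", "improving",
--     "achieve", "achieves", "achieved", "achieving",
--     "demonstrate", "demonstrates", "demonstrated", "demonstrating",
--     "confirm", "confirms", "confirmed", "confirming",
--     "show", "shows", "showed", "shown", "showing",
--     "prove", "proves", "proved", "proven", "proving",
--     "enable", "enables", "enabled", "enabling",
--     "advance", "advances", "advanced", "advancing",
--     "enhance", "enhances", "enhanced", "enhancing",
--     "outperform", "outperforms", "outperformed", "outperforming",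
-- }
--
-- NEGATIVE = {
--     "fail", "fails", "failed", "failing",
--     "not",
--     "contrary",
--     "challenge", "challenges", "challenged", "challenging",
--     "degrade", "degrades", "degraded", "degrading",
--     "contradict", "contradicts", "contradicted", "contradicting",
--     "refute", "refutes", "refuted", "refuting",
--     "unable",
--     "cannot",
--     "worse", "worsens",
-- }
--
-- _NEGATORS = {"not", "cannot", "unable", "no", "neither", "nor", "never", "lack", "lacks"}
--
-- _LIMITATION_PHRASES = [
--     "cannot solve", "does not", "do not", "cannot",
--     "fails to", "unable to", "not reliably", "not consistently",
--     "limitations of", "limits of", "bounded by",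
-- ]
--
-- def _effective_polarity(text: str) -> tuple[bool, bool]:
--     """Return (is_positive, is_negative) accounting for negation.
--
--     A claim like "We show that transformers cannot solve X" contains both
--     "show" (positive) and "cannot" (negative). When a positive word appears
--     near a negator or limitation phrase, it should be treated as negative.
--     """
--     lower = text.lower()
--     word_list = lower.split()
--     words = set(word_list)
--
--     has_pos = bool(words & POSITIVE)
--     has_neg = bool(words & NEGATIVE)
--
--     # Check for limitation phrases that make the overall claim negative
--     has_limitation = any(phrase in lower for phrase in _LIMITATION_PHRASES)
--
--     # Check for negators near positive words (within a 5-word window)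
--     negator_near_positive = False
--     for i, w in enumerate(word_list):
--         if w in POSITIVE:
--             window = set(word_list[max(0, i - 5) : i + 6])
--             if window & _NEGATORS:
--                 negator_near_positive = True
--                 break
--
--     if has_limitation or negator_near_positive:
--         # Positive words are being used in a negative context
--         return False, True
--
--     return has_pos, has_neg
-- ===== SOURCE B (Python) =====
-- POSITIVE = {
--     "improve", "improves", "improved", "improving",
--     "achieve", "achieves", "achieved", "achieving",
--     "demonstrate", "demonstrates", "demonstrated", "demonstrating",
--     "confirm", "confirms", "confirmed", "confirming",
--     "show", "shows", "showed", "shown", "showing",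
--     "prove", "proves", "proved", "proven", "proving",
--     "enable", "enables", "enabled", "enabling",
--     "advance", "advances", "advanced", "advancing",
--     "outperform", "outperforms", "outperformed", "outperforming",
--     "enhance", "enhances", "enhanced", "enhancing",
-- }
--
-- NEGATIVE = {
--     "fail", "fails", "failed", "failing",
--     "not", "contrary",
--     "challenge", "challenges", "challenged", "challenging",
--     "degrade", "degrades", "degraded", "degrading",
--     "contradict", "contradicts", "contradicted", "contradicting",
--     "refute", "refutes", "refuted", "refuting",
--     "unable", "cannot", "worse", "worsens",
-- }
--
-- _NEGATORS = {"not", "cannot", "unable", "no", "neither", "nor", "never", "lack", "lacks"}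
--
-- _LIMITATION_PHRASES = [
--     "cannot solve", "does not", "do not", "cannot",
--     "fails to", "unable to", "not reliably", "not consistently",
--     "limitations of", "limits of", "bounded by",
-- ]
--
-- def _effective_polarity(text):
--     """Index-based variant: record positive/negator word positions in one pass,
--     then decide nearness by |i - j| <= 5 instead of building a window set per word."""
--     lower = text.lower()
--     if any(phrase in lower for phrase in _LIMITATION_PHRASES):
--         return False, True
--     word_list = lower.split()
--     pos_idx = [i for i, w in enumerate(word_list) if w in POSITIVE]
--     neg_idx = [j for j, w in enumerate(word_list) if w in _NEGATORS]
--     if any(abs(i - j) <= 5 for i in pos_idx for j in neg_idx):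
--         return False, True
--     return bool(pos_idx), any(w in NEGATIVE for w in word_list)
-- ===== Notes on version B (the rewrite author's own statement) =====
-- stated objective: alternative
-- what changed: B replaces A's per-positive-word window-set construction (an 11-element slice turned into a set and intersected with the negators per hit) by one pass recording positive and negator word indices, then a direct |i-j|<=5 distance test between the two index lists; the limitation-phrase check short-circuits first.
import Mathlib
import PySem

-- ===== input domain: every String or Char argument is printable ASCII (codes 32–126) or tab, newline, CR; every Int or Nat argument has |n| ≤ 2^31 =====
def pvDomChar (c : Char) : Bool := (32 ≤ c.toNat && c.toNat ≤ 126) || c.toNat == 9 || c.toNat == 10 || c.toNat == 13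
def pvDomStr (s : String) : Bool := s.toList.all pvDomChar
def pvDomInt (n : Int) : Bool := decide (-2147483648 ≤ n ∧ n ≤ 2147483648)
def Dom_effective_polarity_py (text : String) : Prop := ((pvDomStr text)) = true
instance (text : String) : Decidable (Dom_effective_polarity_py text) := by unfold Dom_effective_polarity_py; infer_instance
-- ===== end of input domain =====

-- B records positive/negator word indices in one pass and tests |i-j| ≤ 5 between the
-- index lists, instead of A's per-positive-word window-set intersection (alternative, same cost class).

-- ===== PORT A =====
def pvPOSITIVE : PySem.Set String := PySem.Set.ofList
  ["improve", "improves", "improved", "improving",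
   "achieve", "achieves", "achieved", "achieving",
   "demonstrate", "demonstrates", "demonstrated", "demonstrating",
   "confirm", "confirms", "confirmed", "confirming",
   "show", "shows", "showed", "shown", "showing",
   "prove", "proves", "proved", "proven", "proving",
   "enable", "enables", "enabled", "enabling",
   "advance", "advances", "advanced", "advancing",
   "enhance", "enhances", "enhanced", "enhancing",
   "outperform", "outperforms", "outperformed", "outperforming"]

def pvNEGATIVE : PySem.Set String := PySem.Set.ofList
  ["fail", "fails", "failed", "failing",
   "not", "contrary",
   "challenge", "challenges", "challenged", "challenging",
   "degrade", "degrades", "degraded", "degrading",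
   "contradict", "contradicts", "contradicted", "contradicting",
   "refute", "refutes", "refuted", "refuting",
   "unable", "cannot", "worse", "worsens"]

def pvNEGATORS : PySem.Set String := PySem.Set.ofList
  ["not", "cannot", "unable", "no", "neither", "nor", "never", "lack", "lacks"]

def pvLIMITS : List String :=
  ["cannot solve", "does not", "do not", "cannot",
   "fails to", "unable to", "not reliably", "not consistently",
   "limitations of", "limits of", "bounded by"]

-- A's 'for i, w in enumerate(word_list): … break' loop, as structural recursion on the enumerated list
def pvLoopA (wl : List String) : List (Int × String) → Bool
  | [] => false
  | (i, w) :: rest =>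
    if pvPOSITIVE.contains w then
      if !(PySem.Set.inter (PySem.Set.ofList
            (PySem.List.slice wl (some (max 0 (i - 5))) (some (i + 6)))) pvNEGATORS).isEmpty then
        true
      else pvLoopA wl rest
    else pvLoopA wl rest

def effective_polarity_py (text : String) : Bool × Bool :=
  let lower := PySem.Str.lower text
  let word_list := PySem.Str.split₀ lower
  let words : PySem.Set String := PySem.Set.ofList word_list
  let has_pos := !(PySem.Set.inter words pvPOSITIVE).isEmpty
  let has_neg := !(PySem.Set.inter words pvNEGATIVE).isEmpty
  let has_limitation := pvLIMITS.any (fun p => PySem.Str.isIn p lower)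
  let negator_near_positive := pvLoopA word_list (PySem.List.enumerate word_list 0)
  if has_limitation || negator_near_positive then (false, true)
  else (has_pos, has_neg)

-- ===== PORT B =====
set_option maxHeartbeats 1000000 in
def effective_polarity_py_alt (text : String) : Bool × Bool :=
  let lower := PySem.Str.lower text
  if pvLIMITS.any (fun p => PySem.Str.isIn p lower) then (false, true)
  else
    let wl := PySem.Str.split₀ lower
    let posIdx : List Int := ((PySem.List.enumerate wl 0).filter (fun p => pvPOSITIVE.contains p.2)).map (·.1)
    let negIdx : List Int := ((PySem.List.enumerate wl 0).filter (fun p => pvNEGATORS.contains p.2)).map (·.1)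
    if posIdx.any (fun i => negIdx.any (fun j => decide ((i - j).natAbs ≤ 5))) then (false, true)
    else (!posIdx.isEmpty, wl.any (fun w => pvNEGATIVE.contains w))

-- ===== PRECONDITION & SPEC =====
def Spec_effective_polarity_py (text : String) (out : Bool × Bool) : Prop := out = effective_polarity_py_alt text
instance (text : String) (out : Bool × Bool) : Decidable (Spec_effective_polarity_py text out) := by unfold Spec_effective_polarity_py; infer_instance

-- ===== CLAIM (what is proved, stated in full; the proofs are below) =====
def Claim_equal_effective_polarity_py : Prop := ∀ (text : String), Dom_effective_polarity_py text → Spec_effective_polarity_py text (effective_polarity_py text)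

-- ===== LEMMAS AND PROOFS =====

lemma pvContains_mem {S : PySem.Set String} {x : String} : S.contains x = true ↔ x ∈ S := by
  simp

-- set-intersection nonemptiness is 'some element of wl is in S'
lemma inter_nonempty_eq_any (wl : List String) (S : PySem.Set String) :
    (!(PySem.Set.inter (PySem.Set.ofList wl) S).isEmpty) = wl.any (fun w => S.contains w) := by
  rw [Bool.eq_iff_iff]
  simp only [Bool.not_eq_eq_eq_not, Bool.not_true, List.isEmpty_eq_false_iff_exists_mem,
    List.any_eq_true, PySem.Set.mem_inter, PySem.Set.mem_ofList, PySem.Set.contains_iff]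

-- membership in a drop/take slice, by position
lemma mem_drop_take {α : Type} (wl : List α) (a n : Nat) (x : α) :
    x ∈ (wl.drop a).take n ↔ ∃ m : Nat, a ≤ m ∧ m < a + n ∧ ∃ h : m < wl.length, wl[m] = x := by
  rw [List.mem_iff_getElem]
  constructor
  · rintro ⟨m, hm, hg⟩
    have hm' : m < n ∧ a + m < wl.length := by
      have h2 := hm
      simp only [List.length_take, List.length_drop] at h2
      omega
    refine ⟨a + m, by omega, by omega, hm'.2, ?_⟩
    rw [← hg, List.getElem_take, List.getElem_drop]
  · rintro ⟨m, h1, h2, h3, h4⟩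
    refine ⟨m - a, by simp only [List.length_take, List.length_drop]; omega, ?_⟩
    rw [List.getElem_take, List.getElem_drop, ← h4]
    congr 1
    omega

-- membership in the index list that B records for a word set S
lemma pvMem_idx (wl : List String) (S : PySem.Set String) (j : Int) :
    (j ∈ ((PySem.List.enumerate wl 0).filter (fun p => S.contains p.2)).map (·.1))
    ↔ ∃ m : Nat, ∃ _h : m < wl.length, j = (m : Int) ∧ wl[m] ∈ S := by
  rw [List.mem_map]
  constructor
  · rintro ⟨p, hpf, rfl⟩
    rw [List.mem_filter] at hpf
    obtain ⟨hpe, hpc⟩ := hpf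
    obtain ⟨m, hm, rfl⟩ := (PySem.List.mem_enumerate_iff wl 0 p).1 hpe
    refine ⟨m, hm, by simp, ?_⟩
    exact pvContains_mem.mp hpc
  · rintro ⟨m, hm, rfl, hmem⟩
    refine ⟨(0 + (m : Int), wl[m]), List.mem_filter.mpr ⟨?_, ?_⟩, by simp⟩
    · exact (PySem.List.mem_enumerate_iff wl 0 _).2 ⟨m, hm, rfl⟩
    · exact pvContains_mem.mpr hmem

-- A's loop with break is an 'any' over the enumerated list
lemma pvLoopA_eq_any (wl : List String) (es : List (Int × String)) :
    pvLoopA wl es = es.any (fun p => pvPOSITIVE.contains p.2 &&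
      !(PySem.Set.inter (PySem.Set.ofList
          (PySem.List.slice wl (some (max 0 (p.1 - 5))) (some (p.1 + 6)))) pvNEGATORS).isEmpty) := by
  induction es with
  | nil => rfl
  | cons p rest ih =>
    obtain ⟨i, w⟩ := p
    rw [List.any_cons, ← ih]
    show (if pvPOSITIVE.contains w = true then
          if (!(PySem.Set.inter (PySem.Set.ofList
              (PySem.List.slice wl (some (max 0 (i - 5))) (some (i + 6)))) pvNEGATORS).isEmpty) = true then true
          else pvLoopA wl rest
        else pvLoopA wl rest)
       = ((pvPOSITIVE.contains w && !(PySem.Set.inter (PySem.Set.ofList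
            (PySem.List.slice wl (some (max 0 (i - 5))) (some (i + 6)))) pvNEGATORS).isEmpty) || pvLoopA wl rest)
    generalize pvPOSITIVE.contains w = b1
    generalize (!(PySem.Set.inter (PySem.Set.ofList
        (PySem.List.slice wl (some (max 0 (i - 5))) (some (i + 6)))) pvNEGATORS).isEmpty) = b2
    cases b1 <;> cases b2 <;> simp

-- the window test at index k equals 'some negator index lies within distance 5'
lemma pvWindow_eq_near (wl : List String) (k : Nat) :
    (!(PySem.Set.inter (PySem.Set.ofList
        (PySem.List.slice wl (some (max 0 ((k : Int) - 5))) (some ((k : Int) + 6)))) pvNEGATORS).isEmpty)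
    = (((PySem.List.enumerate wl 0).filter (fun p => pvNEGATORS.contains p.2)).map (·.1)).any
        (fun j => decide (((k : Int) - j).natAbs ≤ 5)) := by
  have hmax : max 0 ((k : Int) - 5) = ((k - 5 : Nat) : Int) := by
    rw [max_def]; split_ifs with h <;> omega
  have hadd : (k : Int) + 6 = ((k + 6 : Nat) : Int) := by omega
  rw [hmax, hadd, PySem.List.slice_natCast, inter_nonempty_eq_any, Bool.eq_iff_iff,
    List.any_eq_true, List.any_eq_true]
  constructor
  · rintro ⟨w, hwmem, hc⟩
    obtain ⟨m, hm1, hm2, hm3, hm4⟩ := (mem_drop_take wl _ _ w).1 hwmem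
    refine ⟨(m : Int), (pvMem_idx wl pvNEGATORS _).2 ⟨m, hm3, rfl, ?_⟩, ?_⟩
    · rw [hm4]; exact pvContains_mem.mp hc
    · simp only [decide_eq_true_eq]
      omega
  · rintro ⟨j, hj, hd⟩
    obtain ⟨m, hm, rfl, hmem⟩ := (pvMem_idx wl pvNEGATORS j).1 hj
    have hd' : ((k : Int) - (m : Int)).natAbs ≤ 5 := of_decide_eq_true hd
    refine ⟨wl[m], (mem_drop_take wl _ _ _).2 ⟨m, by omega, by omega, hm, rfl⟩, ?_⟩
    exact pvContains_mem.mpr hmem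

-- A's whole negator-near-positive loop equals B's index-distance double 'any'
lemma pvLoop_eq_idx (wl : List String) :
    pvLoopA wl (PySem.List.enumerate wl 0)
    = (((PySem.List.enumerate wl 0).filter (fun p => pvPOSITIVE.contains p.2)).map (·.1)).any
        (fun i => (((PySem.List.enumerate wl 0).filter (fun p => pvNEGATORS.contains p.2)).map (·.1)).any
          (fun j => decide ((i - j).natAbs ≤ 5))) := by
  rw [pvLoopA_eq_any, Bool.eq_iff_iff, List.any_eq_true, List.any_eq_true]
  constructor
  · rintro ⟨p, hp, hcond⟩
    obtain ⟨m, hm, rfl⟩ := (PySem.List.mem_enumerate_iff wl 0 p).1 hp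
    dsimp only at hcond
    rw [Bool.and_eq_true] at hcond
    obtain ⟨hc1, hc2⟩ := hcond
    have hz : ((0 : Int) + (m : Int)) = (m : Int) := by ring
    rw [hz] at hc2
    refine ⟨(m : Int), (pvMem_idx wl pvPOSITIVE _).2 ⟨m, hm, rfl, pvContains_mem.mp hc1⟩, ?_⟩
    rw [pvWindow_eq_near wl m] at hc2
    exact hc2
  · rintro ⟨i, hi, hany⟩
    obtain ⟨m, hm, rfl, hmem⟩ := (pvMem_idx wl pvPOSITIVE i).1 hi
    refine ⟨(0 + (m : Int), wl[m]), (PySem.List.mem_enumerate_iff wl 0 _).2 ⟨m, hm, rfl⟩, ?_⟩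
    dsimp only
    rw [Bool.and_eq_true]
    have hz : ((0 : Int) + (m : Int)) = (m : Int) := by ring
    rw [hz, pvWindow_eq_near wl m]
    exact ⟨pvContains_mem.mpr hmem, hany⟩

-- has_pos equals 'B's positive-index list is nonempty'
lemma pvHas_pos_eq (wl : List String) :
    (!(PySem.Set.inter (PySem.Set.ofList wl) pvPOSITIVE).isEmpty)
    = !(((PySem.List.enumerate wl 0).filter (fun p => pvPOSITIVE.contains p.2)).map (·.1)).isEmpty := by
  rw [inter_nonempty_eq_any, Bool.eq_iff_iff, List.any_eq_true, Bool.not_eq_eq_eq_not,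
    Bool.not_true, List.isEmpty_eq_false_iff_exists_mem]
  constructor
  · rintro ⟨w, hw, hc⟩
    obtain ⟨m, hm, rfl⟩ := List.mem_iff_getElem.1 hw
    exact ⟨(m : Int), (pvMem_idx wl pvPOSITIVE _).2 ⟨m, hm, rfl, pvContains_mem.mp hc⟩⟩
  · rintro ⟨j, hj⟩
    obtain ⟨m, hm, rfl, hmem⟩ := (pvMem_idx wl pvPOSITIVE j).1 hj
    exact ⟨wl[m], List.getElem_mem hm, pvContains_mem.mpr hmem⟩

-- ===== VERDICT (by name: the statement is the Claim_ definition above) =====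
set_option maxHeartbeats 4000000 in
theorem effective_polarity_py_spec : Claim_equal_effective_polarity_py := by
  intro text _
  unfold Spec_effective_polarity_py
  show effective_polarity_py text = effective_polarity_py_alt text
  rw [effective_polarity_py, effective_polarity_py_alt]
  rw [pvLoop_eq_idx, pvHas_pos_eq, inter_nonempty_eq_any]
  cases hl : pvLIMITS.any (fun p => PySem.Str.isIn p (PySem.Str.lower text))
  · rw [Bool.false_or]
    rfl
  · rw [Bool.true_or, if_pos rfl, if_pos rfl]
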